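-- pv_equiv track=rewrite | github.com/murilobiss/fut_k10 | fut_k10.py | filtrar_jogadores_presentes
-- ===== SOURCE A (Python) =====
-- descricao_posicoes = {
--     "ZAG": "Zagueiro",
--     "MZA": "Meia recuado",
--     "MEI": "Meia atacante",
--     "ATA": "Atacante",
-- }
--
-- def filtrar_jogadores_presentes(jogadores):
--     jogadores_presentes = {
--         nome: dados for nome, dados in jogadores.items() if dados.get("Presente") == "P"
--     }
--     contagem_posicoes = {
--         posicao: sum(
--             1
--             for dados in jogadores_presentes.values()
--             if dados.get("posicao") == posicao
--         )
--         for posicao in descricao_posicoes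
--     }
--     return jogadores_presentes, contagem_posicoes
-- ===== SOURCE B (Python) =====
-- descricao_posicoes = {
--     "ZAG": "Zagueiro",
--     "MZA": "Meia recuado",
--     "MEI": "Meia atacante",
--     "ATA": "Atacante",
-- }
--
-- def filtrar_jogadores_presentes(jogadores):
--     # One pass: build the filtered dict and maintain a running position counter
--     # (fixed keys in descricao_posicoes order) instead of re-scanning per position.
--     jogadores_presentes = {}
--     contagem_posicoes = {posicao: 0 for posicao in descricao_posicoes}
--     for nome, dados in jogadores.items():
--         if dados.get("Presente") == "P":
--             jogadores_presentes[nome] = dados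
--             pos = dados.get("posicao")
--             if pos in contagem_posicoes:
--                 contagem_posicoes[pos] += 1
--     return jogadores_presentes, contagem_posicoes
-- ===== Notes on version B (the rewrite author's own statement) =====
-- stated objective: simpler
-- what changed: replaces A's filter pass plus four per-position rescans of the present players with a single loop that simultaneously builds the filtered dict and increments a running counter keyed by the four known positions
import Mathlib
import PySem

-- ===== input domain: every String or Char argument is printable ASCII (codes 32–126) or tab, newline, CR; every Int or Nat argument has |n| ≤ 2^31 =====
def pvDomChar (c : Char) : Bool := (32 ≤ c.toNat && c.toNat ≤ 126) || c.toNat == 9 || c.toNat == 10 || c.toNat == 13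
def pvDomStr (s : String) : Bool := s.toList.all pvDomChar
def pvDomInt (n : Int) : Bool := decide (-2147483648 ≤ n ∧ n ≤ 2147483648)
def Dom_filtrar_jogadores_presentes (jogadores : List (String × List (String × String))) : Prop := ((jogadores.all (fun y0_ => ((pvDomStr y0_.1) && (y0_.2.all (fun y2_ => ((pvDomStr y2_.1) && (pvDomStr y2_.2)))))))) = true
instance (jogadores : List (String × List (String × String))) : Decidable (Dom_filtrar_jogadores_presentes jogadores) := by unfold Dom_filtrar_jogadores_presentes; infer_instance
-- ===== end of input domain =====

-- B does one pass over the players, maintaining the filtered dict and a running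
-- position counter, instead of A's filter pass followed by four per-position rescans.

-- shared helper: dados.get(k) on the inner dict (first-match lookup; exact, Pre_ keeps inner keys distinct)
def pvGet (dados : List (String × String)) (k : String) : Option String :=
  (PySem.Dict.mk dados).get? k

-- the four keys of descricao_posicoes, in insertion order
def pvDescKeys : List String := ["ZAG", "MZA", "MEI", "ATA"]

-- ===== PORT A =====
-- dict comprehension over a dict with distinct keys = order-preserving filter (exact under Pre_);
-- sum(1 for … if cond) = the foldl accumulating +1 under cond
def filtrar_jogadores_presentes (jogadores : List (String × List (String × String))) : (List (String × List (String × String))) × (List (String × Int)) :=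
  let jogadores_presentes := jogadores.filter (fun nd => pvGet nd.2 "Presente" == some "P")
  let contagem_posicoes := pvDescKeys.map (fun posicao =>
    (posicao, jogadores_presentes.foldl
      (fun acc nd => if pvGet nd.2 "posicao" == some posicao then acc + 1 else acc) (0 : Int)))
  (jogadores_presentes, contagem_posicoes)

-- ===== PORT B =====
-- one loop body: add the present player to the dict and bump the counter when the
-- position is one of the four known keys ('pos in contagem'; None is never a str key)
def pvStepB (st : PySem.Dict String (List (String × String)) × PySem.Dict String Int)
    (nd : String × List (String × String)) :
    PySem.Dict String (List (String × String)) × PySem.Dict String Int :=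
  if pvGet nd.2 "Presente" == some "P" then
    (st.1.insert nd.1 nd.2,
     match pvGet nd.2 "posicao" with
     | some pos => if st.2.contains pos then st.2.modify pos 0 (· + 1) else st.2
     | none => st.2)
  else st

def filtrar_jogadores_presentes_alt (jogadores : List (String × List (String × String))) : (List (String × List (String × String))) × (List (String × Int)) :=
  let init : PySem.Dict String Int := PySem.Dict.mk [("ZAG", 0), ("MZA", 0), ("MEI", 0), ("ATA", 0)]
  let r := jogadores.foldl pvStepB (PySem.Dict.empty, init)
  (r.1.items, r.2.items)

-- ===== PRECONDITION & SPEC =====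
-- Pre_ excludes association lists with duplicate outer or inner keys: those do not
-- faithfully represent a Python dict (Python collapses duplicates keeping the last
-- value, while the association-list convention reads the first).
def Pre_filtrar_jogadores_presentes (jogadores : List (String × List (String × String))) : Prop :=
  (jogadores.map Prod.fst).Nodup ∧ ∀ nd ∈ jogadores, (nd.2.map Prod.fst).Nodup
instance (jogadores : List (String × List (String × String))) : Decidable (Pre_filtrar_jogadores_presentes jogadores) := by unfold Pre_filtrar_jogadores_presentes; infer_instance

def pvWitness_filtrar_jogadores_presentes : (List (String × List (String × String))) :=
  [("ana", [("Presente", "P"), ("posicao", "ZAG")]), ("bia", [("Presente", "A"), ("posicao", "ATA")])]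

def Spec_filtrar_jogadores_presentes (jogadores : List (String × List (String × String))) (out : (List (String × List (String × String))) × (List (String × Int))) : Prop := out = filtrar_jogadores_presentes_alt jogadores
instance (jogadores : List (String × List (String × String))) (out : (List (String × List (String × String))) × (List (String × Int))) : Decidable (Spec_filtrar_jogadores_presentes jogadores out) := by unfold Spec_filtrar_jogadores_presentes; infer_instance

-- ===== CLAIM (what is proved, stated in full; the proofs are below) =====
def Claim_equal_filtrar_jogadores_presentes : Prop := ∀ (jogadores : List (String × List (String × String))), Dom_filtrar_jogadores_presentes jogadores → Pre_filtrar_jogadores_presentes jogadores → Spec_filtrar_jogadores_presentes jogadores (filtrar_jogadores_presentes jogadores)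

-- ===== LEMMAS AND PROOFS =====

-- abbreviations for the two component loop bodies of B
def pvFP (d : PySem.Dict String (List (String × String))) (nd : String × List (String × String)) :
    PySem.Dict String (List (String × String)) :=
  if pvGet nd.2 "Presente" == some "P" then d.insert nd.1 nd.2 else d

def pvFC (c : PySem.Dict String Int) (nd : String × List (String × String)) : PySem.Dict String Int :=
  if pvGet nd.2 "Presente" == some "P" then
    match pvGet nd.2 "posicao" with
    | some pos => if c.contains pos then c.modify pos 0 (· + 1) else c
    | none => c
  else c

def pvGC (c : PySem.Dict String Int) (nd : String × List (String × String)) : PySem.Dict String Int :=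
  match pvGet nd.2 "posicao" with
  | some pos => if c.contains pos then c.modify pos 0 (· + 1) else c
  | none => c

lemma pv_foldl_pair (l : List (String × List (String × String)))
    (p : PySem.Dict String (List (String × String))) (c : PySem.Dict String Int) :
    l.foldl pvStepB (p, c) = (l.foldl pvFP p, l.foldl pvFC c) := by
  induction l generalizing p c with
  | nil => rfl
  | cons nd t ih =>
    simp only [List.foldl_cons, pvStepB, pvFP, pvFC]
    split <;> exact ih _ _

lemma pv_fc_eq_filter (l : List (String × List (String × String))) (c : PySem.Dict String Int) :
    l.foldl pvFC c = (l.filter (fun nd => pvGet nd.2 "Presente" == some "P")).foldl pvGC c := by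
  rw [List.foldl_filter]
  rfl

lemma pv_fp_eq_filter (l : List (String × List (String × String)))
    (d : PySem.Dict String (List (String × String))) :
    l.foldl pvFP d = (l.filter (fun nd => pvGet nd.2 "Presente" == some "P")).foldl
      (fun d nd => d.insert nd.1 nd.2) d := by
  rw [List.foldl_filter]
  rfl

lemma pv_gc_keys (l : List (String × List (String × String))) (c : PySem.Dict String Int) :
    (l.foldl pvGC c).keys = c.keys := by
  induction l generalizing c with
  | nil => rfl
  | cons nd t ih =>
    simp only [List.foldl_cons]
    rw [ih]
    unfold pvGC
    cases pvGet nd.2 "posicao" with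
    | none => rfl
    | some pos =>
      by_cases h : c.contains pos = true
      · simp only [h, if_true, PySem.Dict.modify]
        rw [PySem.Dict.keys_insert_of_contains]
        exact h
      · simp [h]

lemma pv_gc_getD (l : List (String × List (String × String))) (c : PySem.Dict String Int)
    (k : String) (hk : c.contains k = true) :
    (l.foldl pvGC c).getD k 0
      = c.getD k 0 + ((l.filter (fun nd => pvGet nd.2 "posicao" == some k)).length : Int) := by
  induction l generalizing c with
  | nil => simp
  | cons nd t ih =>
    simp only [List.foldl_cons, List.filter_cons]
    cases hpos : pvGet nd.2 "posicao" with
    | none =>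
      have hstep : pvGC c nd = c := by simp [pvGC, hpos]
      rw [hstep, ih c hk]
      simp
    | some pos =>
      by_cases hpk : pos = k
      · subst hpk
        have hstep : pvGC c nd = c.modify pos 0 (· + 1) := by simp [pvGC, hpos, hk]
        rw [hstep, ih _ (by simp [PySem.Dict.contains_modify, hk])]
        rw [PySem.Dict.getD_modify_self]
        simp only [beq_self_eq_true, if_true, List.length_cons]
        push_cast
        ring
      · have hfilt : (some pos == some k) = false := by simp [hpk]
        by_cases hc : c.contains pos = true
        · have hstep : pvGC c nd = c.modify pos 0 (· + 1) := by simp [pvGC, hpos, hc]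
          rw [hstep, ih _ (by simp [PySem.Dict.contains_modify, hk])]
          rw [PySem.Dict.getD_modify_of_ne]
          · simp [hfilt]
          · exact fun h => hpk h.symm
        · have hstep : pvGC c nd = c := by simp [pvGC, hpos, hc]
          rw [hstep, ih c hk]
          simp [hfilt]

lemma pv_count_foldl (l : List (String × List (String × String)))
    (q : String × List (String × String) → Bool) (a : Int) :
    l.foldl (fun acc nd => if q nd then acc + 1 else acc) a = a + ((l.filter q).length : Int) := by
  induction l generalizing a with
  | nil => simp
  | cons nd t ih =>
    simp only [List.foldl_cons, List.filter_cons]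
    by_cases h : q nd = true
    · simp only [h, if_true]
      rw [ih]
      simp only [List.length_cons]
      push_cast
      ring
    · simp only [h]
      rw [ih]
      simp

lemma pv_pres_items (l : List (String × List (String × String)))
    (h : (l.map Prod.fst).Nodup) :
    (l.foldl (fun d (nd : String × List (String × String)) => d.insert nd.1 nd.2)
      PySem.Dict.empty).items = l := by
  rw [PySem.Dict.items_foldl_insert_fresh l Prod.fst Prod.snd PySem.Dict.empty (by intro a _; simp) h]
  simp [PySem.Dict.empty]

-- ===== VERDICT (by name: the statement is the Claim_ definition above) =====
theorem filtrar_jogadores_presentes_spec : Claim_equal_filtrar_jogadores_presentes := by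
  intro jog _ hpre
  obtain ⟨hnd, _⟩ := hpre
  unfold Spec_filtrar_jogadores_presentes
  unfold filtrar_jogadores_presentes filtrar_jogadores_presentes_alt
  simp only [pv_foldl_pair]
  set P : String × List (String × String) → Bool := fun nd => pvGet nd.2 "Presente" == some "P" with hP
  set l' := jog.filter P with hl'
  refine Prod.ext ?_ ?_
  · -- filtered-players component
    show l' = _
    symm
    rw [pv_fp_eq_filter, ← hl']
    exact pv_pres_items l' (hnd.sublist (List.filter_sublist.map Prod.fst))
  · -- counter component
    show _ = ((jog.foldl pvFC (PySem.Dict.mk [("ZAG", 0), ("MZA", 0), ("MEI", 0), ("ATA", 0)])).items)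
    symm
    rw [pv_fc_eq_filter, ← hl']
    have hkeys : (l'.foldl pvGC (PySem.Dict.mk [("ZAG", 0), ("MZA", 0), ("MEI", 0), ("ATA", 0)])).keys
        = pvDescKeys := by
      rw [pv_gc_keys]; rfl
    have hndk : (l'.foldl pvGC (PySem.Dict.mk [("ZAG", 0), ("MZA", 0), ("MEI", 0), ("ATA", 0)])).keys.Nodup := by
      rw [hkeys]; decide
    rw [PySem.Dict.items_eq_map_keys _ hndk 0, hkeys]
    unfold pvDescKeys
    simp only [List.map_cons, List.map_nil]
    rw [pv_gc_getD _ _ "ZAG" (by decide), pv_gc_getD _ _ "MZA" (by decide),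
        pv_gc_getD _ _ "MEI" (by decide), pv_gc_getD _ _ "ATA" (by decide),
        pv_count_foldl l' (fun nd => pvGet nd.2 "posicao" == some "ZAG") 0,
        pv_count_foldl l' (fun nd => pvGet nd.2 "posicao" == some "MZA") 0,
        pv_count_foldl l' (fun nd => pvGet nd.2 "posicao" == some "MEI") 0,
        pv_count_foldl l' (fun nd => pvGet nd.2 "posicao" == some "ATA") 0]
    have hz : ∀ k : String, (PySem.Dict.mk [("ZAG", (0:Int)), ("MZA", 0), ("MEI", 0), ("ATA", 0)]).getD k 0 = 0 := by
      intro k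
      simp only [PySem.Dict.getD_eq_get?_getD, PySem.Dict.get?_mk_cons]
      repeat' split
      all_goals simp [PySem.Dict.get?]
    simp [hz]
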